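-- pv_equiv track=rewrite | github.com/IT-CodeForge/GUIBuilder | Louis/Generator/TGW_cpp_generator.py | __generate_changed_event
-- ===== SOURCE A (Python) =====
-- def __generate_changed_event(objects: list[dict[str, any]]) -> str:
--     ret_str: str  = "void GUI::eventCheckBox(TGWCheckBox* eineCheckBox, int isChecked_1_0)\n{\n"
--
--     for object in objects:
--
--         if object["type"] == "checkbox":
--             ret_str += "  if(eineCheckBox == this->" + object["name"] + ")\n  {\n"
--             ret_str += "    event_changed_" + object["name"] + "(isChecked_1_0);\n  }\n"
--     ret_str += "}\n"
--     ret_str += "void GUI::eventEditChanged(TGWEdit* einEdit)\n{\n"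
--
--     for object in objects:
--
--         if object["type"] == "edit":
--             ret_str += "  if(einEdit == this->" + object["name"] + ")\n  {\n"
--             ret_str += "    event_changed_" + object["name"] + "();\n  }\n"
--     ret_str += "}\n"
--
--     return ret_str
-- ===== SOURCE B (Python) =====
-- def __generate_changed_event(objects: list[dict[str, any]]) -> str:
--     cb_parts = []
--     ed_parts = []
--     for obj in objects:
--         t = obj["type"]
--         if t == "checkbox":
--             n = obj["name"]
--             cb_parts.append("  if(eineCheckBox == this->" + n + ")\n  {\n"
--                             "    event_changed_" + n + "(isChecked_1_0);\n  }\n")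
--         elif t == "edit":
--             n = obj["name"]
--             ed_parts.append("  if(einEdit == this->" + n + ")\n  {\n"
--                             "    event_changed_" + n + "();\n  }\n")
--     return ("void GUI::eventCheckBox(TGWCheckBox* eineCheckBox, int isChecked_1_0)\n{\n"
--             + "".join(cb_parts)
--             + "}\nvoid GUI::eventEditChanged(TGWEdit* einEdit)\n{\n"
--             + "".join(ed_parts)
--             + "}\n")
-- ===== Notes on version B (the rewrite author's own statement) =====
-- stated objective: alternative
-- what changed: Single partitioning pass over objects collecting checkbox and edit snippets into two lists, then one final concatenation of headers, joined parts and footers, instead of A's two full scans that repeatedly grow one string.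
import Mathlib
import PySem

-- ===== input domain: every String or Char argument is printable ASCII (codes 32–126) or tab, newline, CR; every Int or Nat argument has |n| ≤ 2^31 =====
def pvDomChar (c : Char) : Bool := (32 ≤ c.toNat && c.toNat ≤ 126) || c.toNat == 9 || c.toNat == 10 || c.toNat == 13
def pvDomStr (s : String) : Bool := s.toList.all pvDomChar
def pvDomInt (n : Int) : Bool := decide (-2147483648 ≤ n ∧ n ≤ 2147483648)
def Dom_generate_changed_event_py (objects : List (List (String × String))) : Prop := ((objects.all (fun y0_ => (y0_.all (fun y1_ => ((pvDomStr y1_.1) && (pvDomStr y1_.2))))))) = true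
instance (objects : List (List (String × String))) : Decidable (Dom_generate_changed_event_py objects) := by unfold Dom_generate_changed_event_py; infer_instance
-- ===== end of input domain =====

-- B replaces A's two full scans (each growing one string) by a single partitioning pass into two snippet lists joined once; alternative decomposition, same cost.


-- ===== PORT A =====
-- object["type"] / object["name"]: Python raises KeyError on a missing key; Pre_ excludes
-- exactly those inputs, so the getD default "" is never seen on admitted inputs.
def pvTypeOf (o : List (String × String)) : String := (PySem.Dict.ofList o).getD "type" ""
def pvNameOf (o : List (String × String)) : String := (PySem.Dict.ofList o).getD "name" ""
def pvCbSnip (o : List (String × String)) : String :=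
  ("  if(eineCheckBox == this->" ++ pvNameOf o ++ ")\n  {\n") ++
  ("    event_changed_" ++ pvNameOf o ++ "(isChecked_1_0);\n  }\n")
def pvEdSnip (o : List (String × String)) : String :=
  ("  if(einEdit == this->" ++ pvNameOf o ++ ")\n  {\n") ++
  ("    event_changed_" ++ pvNameOf o ++ "();\n  }\n")

def generate_changed_event_py (objects : List (List (String × String))) : String :=
  let r0 : String := "void GUI::eventCheckBox(TGWCheckBox* eineCheckBox, int isChecked_1_0)\n{\n"
  let r1 : String := objects.foldl
    (fun acc o => if pvTypeOf o == "checkbox" then acc ++ pvCbSnip o else acc) r0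
  let r2 : String := (r1 ++ "}\n") ++ "void GUI::eventEditChanged(TGWEdit* einEdit)\n{\n"
  let r3 : String := objects.foldl
    (fun acc o => if pvTypeOf o == "edit" then acc ++ pvEdSnip o else acc) r2
  r3 ++ "}\n"

-- ===== PORT B =====
def generate_changed_event_py_alt (objects : List (List (String × String))) : String :=
  let parts : List String × List String := objects.foldl
    (fun p o =>
      if pvTypeOf o == "checkbox" then (p.1 ++ [pvCbSnip o], p.2)
      else if pvTypeOf o == "edit" then (p.1, p.2 ++ [pvEdSnip o])
      else p) ([], [])
  ("void GUI::eventCheckBox(TGWCheckBox* eineCheckBox, int isChecked_1_0)\n{\n"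
    ++ String.join parts.1)
  ++ ("}\nvoid GUI::eventEditChanged(TGWEdit* einEdit)\n{\n"
    ++ String.join parts.2)
  ++ "}\n"

-- ===== PRECONDITION & SPEC =====
-- Pre_ excludes exactly the inputs on which Python A raises KeyError: an object with no
-- "type" key, or a checkbox/edit object with no "name" key.
def Pre_generate_changed_event_py (objects : List (List (String × String))) : Prop :=
  (objects.all (fun o =>
    ((PySem.Dict.ofList o).contains "type") &&
    (!(((PySem.Dict.ofList o).getD "type" "" == "checkbox")
       || ((PySem.Dict.ofList o).getD "type" "" == "edit"))
     || (PySem.Dict.ofList o).contains "name"))) = true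
instance (objects : List (List (String × String))) : Decidable (Pre_generate_changed_event_py objects) := by unfold Pre_generate_changed_event_py; infer_instance
def pvWitness_generate_changed_event_py : (List (List (String × String))) :=
  [[("type", "checkbox"), ("name", "cb1")], [("type", "edit"), ("name", "ed1")], [("type", "button")]]

def Spec_generate_changed_event_py (objects : List (List (String × String))) (out : String) : Prop := out = generate_changed_event_py_alt objects
instance (objects : List (List (String × String))) (out : String) : Decidable (Spec_generate_changed_event_py objects out) := by unfold Spec_generate_changed_event_py; infer_instance

-- ===== CLAIM (what is proved, stated in full; the proofs are below) =====
def Claim_equal_generate_changed_event_py : Prop := ∀ (objects : List (List (String × String))), Dom_generate_changed_event_py objects → Pre_generate_changed_event_py objects → Spec_generate_changed_event_py objects (generate_changed_event_py objects)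

-- ===== LEMMAS AND PROOFS =====

-- String.join as a running foldl with an arbitrary seed.
theorem pvJoinAux : ∀ (L : List String) (s : String),
    List.foldl (fun r t => r ++ t) s L = s ++ String.join L := by
  intro L
  induction L with
  | nil => intro s; simp [String.join]
  | cons t L ih =>
    intro s
    have hj : String.join (t :: L) = t ++ String.join L := by
      show List.foldl (fun r t => r ++ t) ("" ++ t) L = t ++ String.join L
      rw [String.empty_append, ih]
    rw [List.foldl_cons, ih, hj, String.append_assoc]

-- A's conditional-append string fold equals the join of the filtered-and-mapped snippets.
theorem pvStrFold (c : List (String × String) → Bool) (g : List (String × String) → String) :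
    ∀ (xs : List (List (String × String))) (s : String),
      xs.foldl (fun acc o => if c o then acc ++ g o else acc) s
        = s ++ String.join ((xs.filter c).map g) := by
  intro xs
  induction xs with
  | nil => intro s; simp [String.join]
  | cons x xs ih =>
    intro s
    rw [List.foldl_cons]
    by_cases h : c x = true
    · rw [if_pos h, ih]
      have hf : List.filter c (x :: xs) = x :: List.filter c xs := by
        simp [List.filter, h]
      rw [hf, List.map_cons]
      have hj : String.join (g x :: List.map g (List.filter c xs))
          = g x ++ String.join (List.map g (List.filter c xs)) := by
        show List.foldl (fun r t => r ++ t) ("" ++ g x) _ = _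
        rw [String.empty_append, pvJoinAux]
      rw [hj, String.append_assoc]
    · rw [if_neg h, ih]
      have hf : List.filter c (x :: xs) = List.filter c xs := by
        simp [List.filter, h]
      rw [hf]

-- B's single pair fold computes both filtered snippet lists at once.
theorem pvPairFold :
    ∀ (xs : List (List (String × String))) (p : List String × List String),
      xs.foldl (fun p o =>
          if pvTypeOf o == "checkbox" then (p.1 ++ [pvCbSnip o], p.2)
          else if pvTypeOf o == "edit" then (p.1, p.2 ++ [pvEdSnip o])
          else p) p
        = (p.1 ++ (xs.filter (fun o => pvTypeOf o == "checkbox")).map pvCbSnip,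
           p.2 ++ (xs.filter (fun o => pvTypeOf o == "edit")).map pvEdSnip) := by
  intro xs
  induction xs with
  | nil => intro p; simp
  | cons x xs ih =>
    intro p
    rw [List.foldl_cons]
    by_cases h1 : (pvTypeOf x == "checkbox") = true
    · have h2 : (pvTypeOf x == "edit") = false := by
        simp only [beq_iff_eq] at h1 ⊢; simp [h1]
      rw [if_pos h1, ih]
      simp [List.filter, h1, h2]
    · rw [if_neg h1]
      by_cases h2 : (pvTypeOf x == "edit") = true
      · rw [if_pos h2, ih]
        simp [List.filter, h1, h2]
      · rw [if_neg h2, ih]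
        simp [List.filter, h1, h2]

-- ===== VERDICT (by name: the statement is the Claim_ definition above) =====
theorem generate_changed_event_py_spec : Claim_equal_generate_changed_event_py := by
  intro objects _ _
  unfold Spec_generate_changed_event_py generate_changed_event_py generate_changed_event_py_alt
  simp only [pvStrFold, pvPairFold, List.nil_append]
  simp [String.append_assoc]
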